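-- pv_equiv track=rewrite | github.com/jacksonfellows/euler | python/134_Prime_pair_connection.py | find_n
-- ===== SOURCE A (Python) =====
-- def find_n(p1, p2):
--     a = 1
--     n_digits = len(str(p1))
--     m = 10 ** n_digits
--     while 1:
--         n = a*p2
--         if n % m == p1:
--             return n
--         a += 1
-- ===== SOURCE B (Python) =====
-- def _gcd(a, b):
--     while b:
--         a, b = b, a % b
--     return a
--
-- def find_n(p1, p2):
--     m = 10 ** len(str(p1))
--     g = _gcd(abs(p2), m)
--     step = m // g
--     a = (p1 // g) * pow(p2 // g, -1, step) % step
--     if a == 0: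
--         a = step
--     return a * p2
-- ===== Notes on version B (the rewrite author's own statement) =====
-- stated objective: faster
-- what changed: A scans multipliers a = 1, 2, 3, ... until a*p2 mod 10^digits == p1; B solves the congruence directly with gcd and a modular inverse (pow(x, -1, step)) and takes the smallest positive solution, no search loop.
import Mathlib
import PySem

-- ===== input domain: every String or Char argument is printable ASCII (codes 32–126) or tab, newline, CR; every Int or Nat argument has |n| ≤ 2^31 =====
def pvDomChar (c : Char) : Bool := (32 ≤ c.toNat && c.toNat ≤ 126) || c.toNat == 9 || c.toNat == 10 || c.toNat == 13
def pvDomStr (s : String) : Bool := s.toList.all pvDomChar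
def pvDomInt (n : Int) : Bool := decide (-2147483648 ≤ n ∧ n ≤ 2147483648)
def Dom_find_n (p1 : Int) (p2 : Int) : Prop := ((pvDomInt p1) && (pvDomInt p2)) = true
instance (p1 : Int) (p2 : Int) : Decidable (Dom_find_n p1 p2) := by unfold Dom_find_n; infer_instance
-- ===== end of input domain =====

-- B replaces A's linear scan over multipliers a = 1, 2, … by a modular-inverse computation
-- (extended gcd), the same exact result in O(log m) arithmetic instead of O(m) iterations.

-- ===== PORT A =====
-- A's `while 1` loop, with fuel: under Pre_find_n the answer's multiplier a lies in
-- [1, 10^digits], so fuel = 10^digits steps always suffice and the 0-fuel branch is dead.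
def findLoopA (p1 p2 m : Int) (a : Int) : Nat → Int
  | 0 => 0
  | fuel + 1 =>
    if PySem.Int.mod (a * p2) m = p1 then a * p2 else findLoopA p1 p2 m (a + 1) fuel

def find_n (p1 : Int) (p2 : Int) : Int :=
  let m : Int := 10 ^ (PySem.Int.toStr p1).length
  findLoopA p1 p2 m 1 m.toNat

-- ===== PORT B =====
-- Source B's hand-written Euclid loop `while b: a, b = b, a % b` on nonnegative arguments.
def pvGcd (a : Nat) (b : Nat) : Nat :=
  if h : b = 0 then a else pvGcd b (a % b)
decreasing_by exact Nat.mod_lt _ (Nat.pos_of_ne_zero h)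

-- port of Python's pow(x, -1, n): for 0 < n and gcd(x,n) = 1 (the only way Source B calls it),
-- both compute the unique inverse of x in [0, n).
def pvInvMod (x n : Int) : Int := PySem.Int.mod (Int.gcdA x n) n

def find_n_alt (p1 : Int) (p2 : Int) : Int :=
  let m : Int := 10 ^ (PySem.Int.toStr p1).length
  let g : Int := (pvGcd p2.natAbs m.toNat : Int)
  let step := PySem.Int.floordiv m g
  let a := PySem.Int.mod (PySem.Int.floordiv p1 g * pvInvMod (PySem.Int.floordiv p2 g) step) step
  (if a = 0 then step else a) * p2

-- ===== PRECONDITION & SPEC =====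
-- Pre_ admits exactly the inputs on which A's `while 1` loop terminates: p1 ≥ 0 and
-- gcd(p2, 10^digits) ∣ p1 (otherwise no multiple of p2 is ≡ p1 and A loops forever).
-- The conjunct p1 < 10^digits holds for EVERY p1 ≥ 0 (a number is smaller than 10^its
-- digit count), so it excludes nothing; it is stated only so the proofs may use it.
def Pre_find_n (p1 : Int) (p2 : Int) : Prop :=
  0 ≤ p1 ∧ p1 < 10 ^ (PySem.Int.toStr p1).length ∧
    (Int.gcd p2 (10 ^ (PySem.Int.toStr p1).length) : Int) ∣ p1
instance (p1 : Int) (p2 : Int) : Decidable (Pre_find_n p1 p2) := by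
  unfold Pre_find_n; infer_instance

def pvWitness_find_n : Int × Int := (19, 7)

def Spec_find_n (p1 : Int) (p2 : Int) (out : Int) : Prop := out = find_n_alt p1 p2
instance (p1 : Int) (p2 : Int) (out : Int) : Decidable (Spec_find_n p1 p2 out) := by
  unfold Spec_find_n; infer_instance

-- ===== CLAIM (what is proved, stated in full; the proofs are below) =====
def Claim_equal_find_n : Prop :=
  ∀ (p1 : Int) (p2 : Int), Dom_find_n p1 p2 → Pre_find_n p1 p2 →
    Spec_find_n p1 p2 (find_n p1 p2)

-- ===== LEMMAS AND PROOFS =====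

-- the multiplier B computes, written with Lean's Euclidean / and % (all divisors positive here)
def pvA0 (p1 p2 m : Int) : Int :=
  let g : Int := Int.gcd p2 m
  let t := m / g
  let a := (p1 / g * (Int.gcdA (p2 / g) t % t)) % t
  if a = 0 then t else a

lemma pvGcd_eq (b : Nat) : ∀ a, pvGcd a b = Nat.gcd b a := by
  induction b using Nat.strong_induction_on with
  | _ b ih =>
    intro a
    unfold pvGcd
    split
    · rename_i h; subst h; simp
    · rename_i h
      rw [ih _ (Nat.mod_lt _ (Nat.pos_of_ne_zero h))]
      exact (Nat.gcd_rec b a).symm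

lemma gcd_pos_nat (p2 m : Int) (hm : 0 < m) : 0 < Int.gcd p2 m := by
  apply Nat.pos_of_ne_zero
  intro h
  rw [Int.gcd_eq_zero_iff] at h
  exact absurd h.2 (by omega)

lemma gcd_pos_int (p2 m : Int) (hm : 0 < m) : (0:Int) < (Int.gcd p2 m : Int) := by
  exact_mod_cast gcd_pos_nat p2 m hm

lemma ediv_gcd_pos (p2 m : Int) (hm : 0 < m) :
    (0:Int) < m / (Int.gcd p2 m : Int) := by
  have hg := gcd_pos_int p2 m hm
  have hgm : (Int.gcd p2 m : Int) ∣ m := Int.gcd_dvd_right p2 m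
  have hmul : (Int.gcd p2 m : Int) * (m / (Int.gcd p2 m : Int)) = m :=
    Int.mul_ediv_cancel' hgm
  by_contra h
  rw [not_lt] at h
  nlinarith

lemma alt_eq_pvA0 (p1 p2 : Int) :
    find_n_alt p1 p2 = pvA0 p1 p2 (10 ^ (PySem.Int.toStr p1).length) * p2 := by
  have hm : (0:Int) < 10 ^ (PySem.Int.toStr p1).length := by positivity
  have hg := gcd_pos_int p2 _ hm
  have ht := ediv_gcd_pos p2 _ hm
  have hgcd : ((pvGcd p2.natAbs ((10:Int) ^ (PySem.Int.toStr p1).length).toNat : Nat) : Int)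
      = (Int.gcd p2 (10 ^ (PySem.Int.toStr p1).length) : Int) := by
    have hTN : ((10:Int) ^ (PySem.Int.toStr p1).length).toNat
        = ((10:Int) ^ (PySem.Int.toStr p1).length).natAbs := by omega
    rw [pvGcd_eq, hTN, Int.gcd_def, Nat.gcd_comm]
  simp only [find_n_alt, pvA0, pvInvMod, hgcd,
    PySem.Int.floordiv_eq_ediv_of_pos hg, PySem.Int.mod_eq_emod_of_pos ht]

lemma pvA0_bounds (p1 p2 m : Int) (hm : 0 < m) :
    1 ≤ pvA0 p1 p2 m ∧ pvA0 p1 p2 m ≤ m / (Int.gcd p2 m : Int) := by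
  have ht := ediv_gcd_pos p2 m hm
  unfold pvA0
  simp only
  have h1 := Int.emod_nonneg (p1 / (Int.gcd p2 m : Int) *
    (Int.gcdA (p2 / (Int.gcd p2 m : Int)) (m / (Int.gcd p2 m : Int)) %
      (m / (Int.gcd p2 m : Int)))) ht.ne'
  have h2 := Int.emod_lt_of_pos (p1 / (Int.gcd p2 m : Int) *
    (Int.gcdA (p2 / (Int.gcd p2 m : Int)) (m / (Int.gcd p2 m : Int)) %
      (m / (Int.gcd p2 m : Int)))) ht
  split_ifs <;> omega

lemma pvA0_cong (p1 p2 m : Int) (hm : 0 < m)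
    (hdvd : (Int.gcd p2 m : Int) ∣ p1) :
    pvA0 p1 p2 m * p2 ≡ p1 [ZMOD m] := by
  have hg := gcd_pos_int p2 m hm
  have ht := ediv_gcd_pos p2 m hm
  have hgp2 : (Int.gcd p2 m : Int) ∣ p2 := Int.gcd_dvd_left p2 m
  have hgm : (Int.gcd p2 m : Int) ∣ m := Int.gcd_dvd_right p2 m
  set g : Int := (Int.gcd p2 m : Int) with hg_def
  set t : Int := m / g with ht_def
  set x : Int := p2 / g with hx_def
  have hxg : x * g = p2 := Int.ediv_mul_cancel hgp2
  have htg : t * g = m := Int.ediv_mul_cancel hgm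
  have hpg : p1 / g * g = p1 := Int.ediv_mul_cancel hdvd
  have hcop : Int.gcd x t = 1 := by
    rw [hx_def, ht_def, hg_def]
    exact Int.gcd_ediv_gcd_ediv_gcd (gcd_pos_nat p2 m hm)
  have hbez : x * Int.gcdA x t + t * Int.gcdB x t = 1 := by
    have := Int.gcd_eq_gcd_ab x t
    rw [hcop] at this
    exact_mod_cast this.symm
  have hinv : x * Int.gcdA x t ≡ 1 [ZMOD t] := by
    rw [Int.modEq_iff_dvd]
    exact ⟨Int.gcdB x t, by linarith⟩
  -- a0 ≡ a1 ≡ (p1/g) * inv  (mod t)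
  have c1 : pvA0 p1 p2 m ≡ p1 / g * (Int.gcdA x t % t) [ZMOD t] := by
    have base : p1 / g * (Int.gcdA x t % t) % t ≡ p1 / g * (Int.gcdA x t % t) [ZMOD t] :=
      Int.emod_emod_of_dvd _ dvd_rfl
    unfold pvA0
    simp only [← hg_def, ← ht_def, ← hx_def]
    split_ifs with h
    · have e0 : t ≡ 0 [ZMOD t] := Int.modEq_iff_dvd.mpr (by simp)
      exact e0.trans (h ▸ base)
    · exact base
  have c2 : Int.gcdA x t % t ≡ Int.gcdA x t [ZMOD t] := Int.emod_emod_of_dvd _ dvd_rfl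
  have c3 : pvA0 p1 p2 m * x ≡ p1 / g [ZMOD t] := by
    calc pvA0 p1 p2 m * x
        ≡ p1 / g * (Int.gcdA x t % t) * x [ZMOD t] := c1.mul_right x
      _ ≡ p1 / g * Int.gcdA x t * x [ZMOD t] := ((c2.mul_left (p1 / g)).mul_right x)
      _ = p1 / g * (x * Int.gcdA x t) := by ring
      _ ≡ p1 / g * 1 [ZMOD t] := hinv.mul_left (p1 / g)
      _ = p1 / g := by ring
  have c4 := c3.mul_right' (c := g)
  rw [htg, hpg] at c4
  calc pvA0 p1 p2 m * p2 = pvA0 p1 p2 m * x * g := by rw [mul_assoc, hxg]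
    _ ≡ p1 [ZMOD m] := c4

lemma pvA0_min (p1 p2 m : Int) (hm : 0 < m) (hdvd : (Int.gcd p2 m : Int) ∣ p1)
    (a : Int) (ha : a * p2 ≡ p1 [ZMOD m]) :
    (m / (Int.gcd p2 m : Int)) ∣ (a - pvA0 p1 p2 m) := by
  have hg := gcd_pos_int p2 m hm
  have hgp2 : (Int.gcd p2 m : Int) ∣ p2 := Int.gcd_dvd_left p2 m
  have hgm : (Int.gcd p2 m : Int) ∣ m := Int.gcd_dvd_right p2 m
  set g : Int := (Int.gcd p2 m : Int) with hg_def
  set t : Int := m / g with ht_def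
  set x : Int := p2 / g with hx_def
  have hxg : x * g = p2 := Int.ediv_mul_cancel hgp2
  have htg : t * g = m := Int.ediv_mul_cancel hgm
  have hcop : Int.gcd x t = 1 := by
    rw [hx_def, ht_def, hg_def]
    exact Int.gcd_ediv_gcd_ediv_gcd (gcd_pos_nat p2 m hm)
  have hcong : a * p2 ≡ pvA0 p1 p2 m * p2 [ZMOD m] := ha.trans (pvA0_cong p1 p2 m hm hdvd).symm
  have hdm : m ∣ (pvA0 p1 p2 m * p2 - a * p2) := Int.ModEq.dvd hcong
  have hdt : t ∣ (pvA0 p1 p2 m - a) * x := by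
    have h1 : (pvA0 p1 p2 m - a) * x * g = pvA0 p1 p2 m * p2 - a * p2 := by
      rw [← hxg]; ring
    have h2 : t * g ∣ (pvA0 p1 p2 m - a) * x * g := by rw [h1, htg]; exact hdm
    exact (mul_dvd_mul_iff_right hg.ne').mp h2
  have hcop' : IsCoprime t x := by
    rw [Int.isCoprime_iff_gcd_eq_one, Int.gcd_comm]
    exact hcop
  have hfin := hcop'.dvd_of_dvd_mul_right hdt
  simpa [neg_sub] using dvd_neg.mpr hfin

lemma loopA_reaches (p1 p2 m a0 : Int) (hcond : PySem.Int.mod (a0 * p2) m = p1)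
    (d : Nat) :
    ∀ (a : Int) (fuel : Nat), a0 = a + d → d < fuel →
      (∀ b : Int, a ≤ b → b < a0 → PySem.Int.mod (b * p2) m ≠ p1) →
      findLoopA p1 p2 m a fuel = a0 * p2 := by
  induction d with
  | zero =>
    intro a fuel heq hfuel _
    obtain ⟨f, rfl⟩ : ∃ f, fuel = f + 1 := ⟨fuel - 1, by omega⟩
    have : a = a0 := by omega
    subst this
    simp [findLoopA, hcond]
  | succ d ih =>
    intro a fuel heq hfuel hmin
    obtain ⟨f, rfl⟩ : ∃ f, fuel = f + 1 := ⟨fuel - 1, by omega⟩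
    have hne : PySem.Int.mod (a * p2) m ≠ p1 := hmin a le_rfl (by omega)
    simp only [findLoopA, hne, if_false]
    exact ih (a + 1) f (by omega) (by omega) (fun b hb hb' => hmin b (by omega) hb')

lemma mod_eq_iff_modeq (z p1 m : Int) (hm : 0 < m) (h0 : 0 ≤ p1) (h1 : p1 < m) :
    PySem.Int.mod z m = p1 ↔ z ≡ p1 [ZMOD m] := by
  rw [PySem.Int.mod_eq_emod_of_pos hm, Int.ModEq, Int.emod_eq_of_lt h0 h1]

-- ===== VERDICT (by name: the statement is the Claim_ definition above) =====
theorem find_n_spec : Claim_equal_find_n := by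
  intro p1 p2 _ hpre
  obtain ⟨h0, h1, hdvd⟩ := hpre
  unfold Spec_find_n
  rw [alt_eq_pvA0 p1 p2]
  show findLoopA p1 p2 (10 ^ (PySem.Int.toStr p1).length) 1
      ((10:Int) ^ (PySem.Int.toStr p1).length).toNat
    = pvA0 p1 p2 (10 ^ (PySem.Int.toStr p1).length) * p2
  set m : Int := 10 ^ (PySem.Int.toStr p1).length with hm_def
  have hm : 0 < m := by rw [hm_def]; positivity
  have hg := gcd_pos_int p2 m hm
  have ht := ediv_gcd_pos p2 m hm
  have htm : m / (Int.gcd p2 m : Int) ≤ m := Int.ediv_le_self _ hm.le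
  obtain ⟨ha1, ha2⟩ := pvA0_bounds p1 p2 m hm
  have hcong := pvA0_cong p1 p2 m hm hdvd
  have hcond : PySem.Int.mod (pvA0 p1 p2 m * p2) m = p1 :=
    (mod_eq_iff_modeq _ _ _ hm h0 h1).mpr hcong
  apply loopA_reaches p1 p2 m (pvA0 p1 p2 m) hcond (pvA0 p1 p2 m - 1).toNat 1 m.toNat
  · omega
  · omega
  · intro b hb hb' hbad
    have hmod := (mod_eq_iff_modeq _ _ _ hm h0 h1).mp hbad
    have hdvd2 := pvA0_min p1 p2 m hm hdvd b hmod
    have hneg : m / (Int.gcd p2 m : Int) ∣ (pvA0 p1 p2 m - b) := by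
      simpa [neg_sub] using dvd_neg.mpr hdvd2
    have := Int.le_of_dvd (by omega) hneg
    omega
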